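-- pv_equiv track=rewrite | github.com/horatioxu1122/a | lib/_common.py | parse_specs
-- ===== SOURCE A (Python) =====
-- def parse_specs(argv, si, cfg):
--     specs, parts, parsing = [], [], True
--     for a in argv[si:]:
--         if a in ['--seq', '--sequential']: continue
--         if parsing and ':' in a and len(a) <= 4:
--             p = a.split(':')
--             if len(p) == 2 and p[0] in ['c', 'l', 'g'] and p[1].isdigit(): specs.append((p[0], int(p[1]))); continue
--         parsing = False; parts.append(a)
--     return (specs, cfg.get('codex_prompt', ''), True) if not parts else (specs, ' '.join(parts), False)
-- ===== SOURCE B (Python) =====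
-- def _spec_of(a):
--     if ':' in a and len(a) <= 4:
--         p = a.split(':')
--         if len(p) == 2 and p[0] in ('c', 'l', 'g') and p[1].isdigit():
--             return (p[0], int(p[1]))
--     return None
--
--
-- def parse_specs(argv, si, cfg):
--     # Right-to-left pass: spec-shaped tokens are held tentatively and demoted
--     # to parts as soon as a non-spec token appears to their left.
--     tent, parts_rev = [], []
--     for a in reversed(argv[si:]):
--         if a in ('--seq', '--sequential'):
--             continue
--         sp = _spec_of(a)
--         if sp is None:
--             parts_rev.extend(tok for tok, _ in tent)
--             parts_rev.append(a)
--             tent = []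
--         else:
--             tent.append((a, sp))
--     specs = [sp for _, sp in reversed(tent)]
--     if parts_rev:
--         return (specs, ' '.join(reversed(parts_rev)), False)
--     return (specs, cfg.get('codex_prompt', ''), True)
-- ===== Notes on version B (the rewrite author's own statement) =====
-- stated objective: alternative
-- what changed: Replaces A's left-to-right latching-flag loop by a single right-to-left pass that tentatively collects spec-shaped tokens and demotes them to parts whenever a non-spec token appears to their left; no parsing flag and no prefix scan.
import Mathlib
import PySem

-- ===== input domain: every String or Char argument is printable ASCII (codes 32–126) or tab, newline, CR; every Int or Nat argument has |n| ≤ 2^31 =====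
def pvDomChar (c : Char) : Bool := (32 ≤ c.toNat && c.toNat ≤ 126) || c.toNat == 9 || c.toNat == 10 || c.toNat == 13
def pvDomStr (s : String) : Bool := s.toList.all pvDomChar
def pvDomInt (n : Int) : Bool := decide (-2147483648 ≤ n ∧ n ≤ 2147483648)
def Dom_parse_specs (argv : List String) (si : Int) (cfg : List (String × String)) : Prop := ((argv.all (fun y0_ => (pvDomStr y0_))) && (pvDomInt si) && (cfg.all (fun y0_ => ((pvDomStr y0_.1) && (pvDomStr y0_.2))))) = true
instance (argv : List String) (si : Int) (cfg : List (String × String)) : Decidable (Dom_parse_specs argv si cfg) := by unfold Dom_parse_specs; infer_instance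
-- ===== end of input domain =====

-- B replaces the left-to-right latching-flag loop by a right-to-left pass with tentative-spec demotion (no speed claim).
-- ===== PORT A =====
-- A's loop body: skip flags; while still parsing, try the spec shape, else latch parsing off and collect the part.
def pvStepA (st : List (String × Int) × List String × Bool) (a : String) :
    List (String × Int) × List String × Bool :=
  if a == "--seq" || a == "--sequential" then st
  else if st.2.2 && PySem.Str.isIn ":" a && decide (PySem.Str.len a ≤ 4) then
    match (PySem.Str.split? a ":").getD [] with
    | [p0, p1] =>
      if (p0 == "c" || p0 == "l" || p0 == "g") && PySem.Str.strIsdigit p1 then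
        (st.1 ++ [(p0, (PySem.Int.ofStr? p1).getD 0)], st.2.1, st.2.2)  -- int(p1): exact, guarded by isdigit
      else (st.1, st.2.1 ++ [a], false)
    | _ => (st.1, st.2.1 ++ [a], false)
  else (st.1, st.2.1 ++ [a], false)

def parse_specs (argv : List String) (si : Int) (cfg : List (String × String)) : (List (String × Int)) × String × Bool :=
  let st := (PySem.List.slice argv (some si) none).foldl pvStepA ([], [], true)
  if st.2.1.isEmpty then (st.1, (PySem.Dict.mk cfg).getD "codex_prompt" "", true)
  else (st.1, PySem.Str.join " " st.2.1, false)

-- ===== PORT B =====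
-- B's helper _spec_of: 'a' is a spec token iff this returns some.
def pvSpecOf? (a : String) : Option (String × Int) :=
  if PySem.Str.isIn ":" a && decide (PySem.Str.len a ≤ 4) then
    match (PySem.Str.split? a ":").getD [] with
    | [p0, p1] =>
      if (p0 == "c" || p0 == "l" || p0 == "g") && PySem.Str.strIsdigit p1 then
        some (p0, (PySem.Int.ofStr? p1).getD 0)  -- int(p1): exact, guarded by isdigit
      else none
    | _ => none
  else none

-- B's loop body over the reversed tokens: state = (tentative specs rightmost-first, parts reversed).
def pvStepB (st : List (String × (String × Int)) × List String) (a : String) :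
    List (String × (String × Int)) × List String :=
  if a == "--seq" || a == "--sequential" then st
  else match pvSpecOf? a with
    | none => ([], st.2 ++ st.1.map Prod.fst ++ [a])
    | some sp => (st.1 ++ [(a, sp)], st.2)

def parse_specs_alt (argv : List String) (si : Int) (cfg : List (String × String)) : (List (String × Int)) × String × Bool :=
  let st := (PySem.List.slice argv (some si) none).reverse.foldl pvStepB ([], [])
  let specs := st.1.reverse.map Prod.snd
  if st.2.isEmpty then (specs, (PySem.Dict.mk cfg).getD "codex_prompt" "", true)
  else (specs, PySem.Str.join " " st.2.reverse, false)

-- ===== PRECONDITION & SPEC =====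
def Spec_parse_specs (argv : List String) (si : Int) (cfg : List (String × String)) (out : (List (String × Int)) × String × Bool) : Prop := out = parse_specs_alt argv si cfg
instance (argv : List String) (si : Int) (cfg : List (String × String)) (out : (List (String × Int)) × String × Bool) : Decidable (Spec_parse_specs argv si cfg out) := by unfold Spec_parse_specs; infer_instance

-- ===== CLAIM (what is proved, stated in full; the proofs are below) =====
def Claim_equal_parse_specs : Prop := ∀ (argv : List String) (si : Int) (cfg : List (String × String)), Dom_parse_specs argv si cfg → Spec_parse_specs argv si cfg (parse_specs argv si cfg)

-- ===== LEMMAS AND PROOFS =====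

-- Common reference: split a flag-free token list at the longest spec-shaped prefix, keeping the raw tokens.
def pvSpanB (args : List String) : List (String × (String × Int)) × List String :=
  match args with
  | [] => ([], [])
  | a :: rest =>
    match pvSpecOf? a with
    | some sp => let r := pvSpanB rest; ((a, sp) :: r.1, r.2)
    | none => ([], a :: rest)

theorem pvSpanB_append (args : List String) :
    (pvSpanB args).1.map Prod.fst ++ (pvSpanB args).2 = args := by
  induction args with
  | nil => rfl
  | cons a rest ih =>
    cases hsp : pvSpecOf? a with
    | some sp => simp [pvSpanB, hsp, ih]
    | none => simp [pvSpanB, hsp]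

-- Both folds ignore the flag tokens, so each equals the fold over the filtered list.
theorem foldA_filter (xs : List String) (st : List (String × Int) × List String × Bool) :
    xs.foldl pvStepA st
      = (xs.filter (fun a => !(a == "--seq" || a == "--sequential"))).foldl pvStepA st := by
  induction xs generalizing st with
  | nil => rfl
  | cons a rest ih =>
    by_cases h : (a == "--seq" || a == "--sequential") = true
    · have hst : pvStepA st a = st := by simp [pvStepA, h]
      rw [List.foldl_cons, hst, List.filter_cons, if_neg (by simp [h])]
      exact ih st
    · rw [List.foldl_cons, List.filter_cons, if_pos (by simp [h]), List.foldl_cons]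
      exact ih (pvStepA st a)

theorem foldB_filter (xs : List String) (st : List (String × (String × Int)) × List String) :
    xs.foldl pvStepB st
      = (xs.filter (fun a => !(a == "--seq" || a == "--sequential"))).foldl pvStepB st := by
  induction xs generalizing st with
  | nil => rfl
  | cons a rest ih =>
    by_cases h : (a == "--seq" || a == "--sequential") = true
    · have hst : pvStepB st a = st := by simp [pvStepB, h]
      rw [List.foldl_cons, hst, List.filter_cons, if_neg (by simp [h])]
      exact ih st
    · rw [List.foldl_cons, List.filter_cons, if_pos (by simp [h]), List.foldl_cons]
      exact ih (pvStepB st a)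

-- On a flag-free token, A's step is the spec test.
theorem stepA_char (st : List (String × Int) × List String × Bool) (a : String)
    (hflag : (a == "--seq" || a == "--sequential") = false) (hp : st.2.2 = true) :
    pvStepA st a = match pvSpecOf? a with
      | some sp => (st.1 ++ [sp], st.2.1, st.2.2)
      | none => (st.1, st.2.1 ++ [a], false) := by
  unfold pvStepA pvSpecOf?
  rw [hflag, hp]
  by_cases h1 : (PySem.Str.isIn ":" a && decide (PySem.Str.len a ≤ 4)) = true
  · have hc : (PySem.Str.isIn ":" a) = true ∧ (decide (PySem.Str.len a ≤ 4)) = true := by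
      simpa using h1
    simp only [Bool.true_and, hc.1, hc.2]
    cases hsplit : (PySem.Str.split? a ":").getD [] with
    | nil => simp
    | cons p0 ps =>
      cases ps with
      | nil => simp
      | cons p1 ps' =>
        cases ps' with
        | nil =>
          by_cases h2 : ((p0 = "c" ∨ p0 = "l") ∨ p0 = "g") ∧ PySem.Chars.strIsdigit p1.toList = true
          · simp [h2]
          · simp [h2]
        | cons _ _ => simp
  · simp only [Bool.not_eq_true] at h1
    rcases Bool.and_eq_false_iff.mp h1 with h | h
    · have h' : PySem.Chars.isIn [':'] a.toList = false := by simpa using h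
      simp [h']
    · have hgt : ¬ (PySem.Str.len a ≤ 4) := by simpa using h
      simp [PySem.Str.len_eq] at hgt
      have hcond : ¬ (PySem.Chars.isIn [':'] a.toList = true ∧ a.length ≤ 4) :=
        fun hx => absurd hx.2 (by omega)
      simp [hcond]

-- Once parsing is latched off, A only appends parts (flag-free list).
theorem foldA_off (args : List String) (specs : List (String × Int)) (parts : List String)
    (hf : ∀ a ∈ args, (a == "--seq" || a == "--sequential") = false) :
    args.foldl pvStepA (specs, parts, false) = (specs, parts ++ args, false) := by
  induction args generalizing parts with
  | nil => simp
  | cons a rest ih =>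
    have ha := hf a (by simp)
    have hstep : pvStepA (specs, parts, false) a = (specs, parts ++ [a], false) := by
      simp [pvStepA, ha]
    simp only [List.foldl_cons, hstep]
    rw [ih (parts ++ [a]) (fun b hb => hf b (by simp [hb]))]
    simp

-- A-side invariant: A's fold from a parsing state computes the span of the flag-free list.
theorem foldA_span (args : List String) (specs : List (String × Int))
    (hf : ∀ a ∈ args, (a == "--seq" || a == "--sequential") = false) :
    args.foldl pvStepA (specs, [], true)
      = (specs ++ (pvSpanB args).1.map Prod.snd, (pvSpanB args).2, (pvSpanB args).2.isEmpty) := by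
  induction args generalizing specs with
  | nil => simp [pvSpanB]
  | cons a rest ih =>
    have ha := hf a (by simp)
    have hstep := stepA_char (specs, [], true) a ha rfl
    cases hsp : pvSpecOf? a with
    | some sp =>
      rw [hsp] at hstep
      simp only [List.foldl_cons, hstep]
      rw [ih (specs ++ [sp]) (fun b hb => hf b (by simp [hb]))]
      simp [pvSpanB, hsp]
    | none =>
      rw [hsp] at hstep
      simp only [List.foldl_cons, hstep, List.nil_append]
      rw [foldA_off rest specs [a] (fun b hb => hf b (by simp [hb]))]
      simp [pvSpanB, hsp]

-- B-side invariant: B's reversed fold computes the reversed span of the flag-free list.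
theorem foldB_span (args : List String)
    (hf : ∀ a ∈ args, (a == "--seq" || a == "--sequential") = false) :
    args.reverse.foldl pvStepB ([], [])
      = ((pvSpanB args).1.reverse, (pvSpanB args).2.reverse) := by
  rw [List.foldl_reverse]
  induction args with
  | nil => simp [pvSpanB]
  | cons a rest ih =>
    have ha := hf a (by simp)
    rw [List.foldr_cons, ih (fun b hb => hf b (by simp [hb]))]
    cases hsp : pvSpecOf? a with
    | some sp => simp [pvStepB, ha, hsp, pvSpanB]
    | none =>
      have hrec := pvSpanB_append rest
      simp only [pvStepB, ha, Bool.false_eq_true, hsp]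
      simp [pvSpanB, hsp, ← List.reverse_append, hrec]

-- ===== VERDICT (by name: the statement is the Claim_ definition above) =====
theorem parse_specs_spec : Claim_equal_parse_specs := by
  intro argv si cfg _
  unfold Spec_parse_specs parse_specs parse_specs_alt
  rw [foldA_filter, foldB_filter, List.filter_reverse]
  set args := (PySem.List.slice argv (some si) none).filter
      (fun a => !(a == "--seq" || a == "--sequential")) with hargs
  have hf : ∀ a ∈ args, (a == "--seq" || a == "--sequential") = false := by
    intro a ha
    rw [hargs] at ha
    have := List.of_mem_filter ha
    simpa using this
  rw [foldA_span args [] hf, foldB_span args hf]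
  simp
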